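-- pv_equiv track=rewrite | github.com/merc1er/huffman-coding-python | corentin.mercier_huffman.py | remove1
-- ===== SOURCE A (Python) =====
-- def remove1(string):
--     """
--     Removes all the 1s from a given string, but not just that ;)
--     """
--     string = str(string)
--     ret = ""
--     for x in string:
--         if x == "1":
--             ret = ""
--         else:
--             ret += "0"
--     return ret
-- ===== SOURCE B (Python) =====
-- def remove1(string):
--     string = str(string)
--     return "0" * (len(string) - string.rfind("1") - 1)
-- ===== Notes on version B (the rewrite author's own statement) =====
-- stated objective: idiomatic
-- what changed: Replaced the per-character loop with reset/append branches by a closed form: locate the last '1' with rfind and emit len - rfind - 1 zeros via string repetition.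
import Mathlib
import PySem

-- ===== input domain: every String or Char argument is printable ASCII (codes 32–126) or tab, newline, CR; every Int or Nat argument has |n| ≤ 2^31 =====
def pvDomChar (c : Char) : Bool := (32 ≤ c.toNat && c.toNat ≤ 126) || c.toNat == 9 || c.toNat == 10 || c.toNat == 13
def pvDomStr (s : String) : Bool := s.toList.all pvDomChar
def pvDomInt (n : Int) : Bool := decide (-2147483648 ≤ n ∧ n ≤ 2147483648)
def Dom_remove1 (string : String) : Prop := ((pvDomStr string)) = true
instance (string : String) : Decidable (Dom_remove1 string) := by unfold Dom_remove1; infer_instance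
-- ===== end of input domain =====

-- B replaces A's per-character loop (reset on '1', append '0' otherwise) by a closed
-- form: the position of the last '1' via rfind and a string repetition (idiomatic).

-- ===== PORT A =====
-- A: iterate over the characters, resetting the accumulator on '1', appending "0" otherwise.
def remove1 (string : String) : String :=
  string.toList.foldl (fun ret x => if x = '1' then "" else ret ++ "0") ""

-- ===== PORT B =====
-- B: "0" * (len(string) - string.rfind("1") - 1)
def remove1_alt (string : String) : String :=
  String.ofList (PySem.List.pyRepeat ['0'] (PySem.Str.len string - PySem.Str.rfind string "1" - 1))

-- ===== PRECONDITION & SPEC =====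
def Spec_remove1 (string : String) (out : String) : Prop := out = remove1_alt string
instance (string : String) (out : String) : Decidable (Spec_remove1 string out) := by unfold Spec_remove1; infer_instance

-- ===== CLAIM (what is proved, stated in full; the proofs are below) =====
def Claim_equal_remove1 : Prop := ∀ (string : String), Dom_remove1 string → Spec_remove1 string (remove1 string)

-- ===== LEMMAS AND PROOFS =====

-- number of characters strictly after the last '1' (= the whole length if no '1')
def pvTail1 (l : List Char) : Nat := (l.reverse.takeWhile (fun c => c ≠ '1')).length

theorem pvTail1_concat (l : List Char) (c : Char) :
    pvTail1 (l ++ [c]) = if c = '1' then 0 else pvTail1 l + 1 := by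
  unfold pvTail1
  simp [List.takeWhile]
  split_ifs with h <;> simp [h]

theorem pvTail1_of_not_mem (l : List Char) (h : '1' ∉ l) : pvTail1 l = l.length := by
  unfold pvTail1
  rw [List.takeWhile_eq_self_iff.mpr]
  · simp
  · intro c hc
    simp only [List.mem_reverse] at hc
    simp only [ne_eq, decide_eq_true_eq]
    intro e
    exact h (e ▸ hc)

-- the String-valued fold of port A is the ofList image of the same fold on char lists
theorem pvFoldStr (l : List Char) : ∀ (acc : List Char),
    l.foldl (fun ret x => if x = '1' then "" else ret ++ "0") (String.ofList acc)
      = String.ofList (l.foldl (fun r x => if x = '1' then [] else r ++ ['0']) acc) := by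
  induction l with
  | nil => intro acc; simp
  | cons x t ih =>
    intro acc
    simp only [List.foldl_cons]
    by_cases hx : x = '1'
    · rw [if_pos hx, if_pos hx]
      exact ih []
    · rw [if_neg hx, if_neg hx]
      have : String.ofList acc ++ "0" = String.ofList (acc ++ ['0']) := by
        have h0 : ("0" : String) = String.ofList ['0'] := rfl
        rw [h0]; simp
      rw [this]
      exact ih (acc ++ ['0'])

-- characterisation of the char-list fold
theorem pvFoldA (l : List Char) : ∀ (acc : List Char),
    l.foldl (fun r x => if x = '1' then [] else r ++ ['0']) acc
      = if '1' ∈ l then List.replicate (pvTail1 l) '0'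
        else acc ++ List.replicate l.length '0' := by
  induction l using List.reverseRecOn with
  | nil => intro acc; simp
  | append_singleton l c ih =>
    intro acc
    rw [List.foldl_append]
    simp only [List.foldl_cons, List.foldl_nil]
    rw [ih acc, pvTail1_concat]
    by_cases hc : c = '1'
    · subst hc; simp
    · have hne : ¬ ('1' = c) := fun e => hc e.symm
      by_cases hm : '1' ∈ l
      · simp [hm, hc, hne, List.replicate_succ']
      · simp [hm, hc, hne, List.replicate_succ']

-- for the single-character pattern ['1'], appending a character does not change
-- the prefix tests at indices below l.length
theorem pvGoAppend (l : List Char) (c : Char) :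
    ∀ m, m < l.length →
      PySem.Chars.rfind.go (l ++ [c]) ['1'] m = PySem.Chars.rfind.go l ['1'] m := by
  intro m
  induction m with
  | zero =>
    intro h
    have hne : l ≠ [] := by intro e; simp [e] at h
    obtain ⟨a, t, rfl⟩ := List.exists_cons_of_ne_nil hne
    simp [PySem.Chars.rfind.go, List.isPrefixOf]
  | succ j ih =>
    intro h
    have hj : j < l.length := Nat.lt_of_succ_lt h
    have hd : (l ++ [c]).drop (j + 1) = l.drop (j + 1) ++ [c] :=
      List.drop_append_of_le_length (by omega)
    simp only [PySem.Chars.rfind.go, hd]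
    by_cases hlen : j + 1 < l.length
    · have hne : l.drop (j + 1) ≠ [] := by
        intro e
        have := List.length_drop (l := l) (i := j + 1)
        rw [e] at this; simp at this; omega
      obtain ⟨a, t, he⟩ := List.exists_cons_of_ne_nil hne
      rw [he]
      simp [List.isPrefixOf, ih hj]
    · have hlen' : j + 1 = l.length := by omega
      have hnil : l.drop (j + 1) = [] := by simp [hlen']
      rw [hnil]
      simp [List.isPrefixOf, hlen', ih hj]
      intro hc
      omega

theorem pvRfindConcat (l : List Char) (c : Char) :
    PySem.Chars.rfind (l ++ [c]) ['1'] =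
      if c = '1' then (l.length : Int) else PySem.Chars.rfind l ['1'] := by
  unfold PySem.Chars.rfind
  rcases l with _ | ⟨a, t⟩
  · simp only [List.nil_append, List.length_nil, List.length_cons]
    simp only [PySem.Chars.rfind.go, List.drop_succ_cons, List.drop_nil]
    by_cases hc : c = '1'
    · simp [hc, List.isPrefixOf]
    · have hne : ¬ ('1' = c) := fun e => hc e.symm
      simp [hc, hne, List.isPrefixOf]
  · have hlen : (a :: t).length = t.length + 1 := by simp
    have hlen2 : ((a :: t) ++ [c]).length = t.length + 1 + 1 := by simp
    rw [hlen, hlen2]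
    have hd2 : ((a :: t) ++ [c]).drop (t.length + 1 + 1) = [] :=
      List.drop_eq_nil_of_le (by simp)
    have hd1 : ((a :: t) ++ [c]).drop (t.length + 1) = [c] := by
      rw [show t.length + 1 = (a :: t).length from hlen.symm, List.drop_left]
    have hd0 : (a :: t).drop (t.length + 1) = [] :=
      List.drop_eq_nil_of_le (by simp)
    have hgo : PySem.Chars.rfind.go ((a :: t) ++ [c]) ['1'] t.length
        = PySem.Chars.rfind.go (a :: t) ['1'] t.length :=
      pvGoAppend (a :: t) c t.length (by simp)
    simp only [PySem.Chars.rfind.go, hd2, hd1, hd0, List.isPrefixOf, hgo]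
    by_cases hc : c = '1'
    · simp [hc]
    · have hb : ('1' == c) = false := by
        simp only [beq_eq_false_iff_ne, ne_eq]
        exact fun e => hc e.symm
      simp [hb, hc]

theorem pvRfindBounds (l : List Char) :
    -1 ≤ PySem.Chars.rfind l ['1'] ∧ PySem.Chars.rfind l ['1'] < l.length := by
  induction l using List.reverseRecOn with
  | nil => simp [PySem.Chars.rfind, PySem.Chars.rfind.go, List.isPrefixOf]
  | append_singleton l c ih =>
    obtain ⟨h1, h2⟩ := ih
    rw [pvRfindConcat]
    split_ifs <;> simp only [List.length_append, List.length_cons, List.length_nil] <;> omega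

theorem pvRfindTail1 (l : List Char) :
    ((l.length : Int) - PySem.Chars.rfind l ['1'] - 1).toNat = pvTail1 l := by
  induction l using List.reverseRecOn with
  | nil => simp [PySem.Chars.rfind, PySem.Chars.rfind.go, List.isPrefixOf, pvTail1]
  | append_singleton l c ih =>
    rw [pvRfindConcat, pvTail1_concat]
    obtain ⟨hlo, hhi⟩ := pvRfindBounds l
    by_cases hc : c = '1'
    · simp [hc]
    · simp only [hc, if_false, List.length_append, List.length_cons, List.length_nil, ← ih]
      omega

theorem pvRemove1Eq (s : String) : remove1 s = remove1_alt s := by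
  unfold remove1 remove1_alt
  have hempty : ("" : String) = String.ofList [] := rfl
  rw [hempty, pvFoldStr s.toList [], pvFoldA s.toList []]
  simp only [List.nil_append]
  rw [PySem.Str.rfind_eq, PySem.Str.len_eq]
  have h1 : ("1" : String).toList = ['1'] := rfl
  rw [h1, PySem.List.pyRepeat_singleton, pvRfindTail1]
  by_cases hm : '1' ∈ s.toList
  · simp [hm]
  · simp [hm, pvTail1_of_not_mem s.toList hm]

-- ===== VERDICT (by name: the statement is the Claim_ definition above) =====
theorem remove1_spec : Claim_equal_remove1 := by
  intro s _
  unfold Spec_remove1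
  exact pvRemove1Eq s
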